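-- pv_equiv track=rewrite | github.com/451646464/encrption_interface | main.py | transfer_encrypt_not_key
-- ===== SOURCE A (Python) =====
-- import math
--
-- def transfer_encrypt_not_key(message):
--     plaintext = message
--     num_columns = 3
--     num_rows = math.ceil(len(plaintext) / num_columns)
--     remaining_chars = num_columns * num_rows - len(plaintext)
--     for i in range(remaining_chars):
--         plaintext += "x"
--     matrix = [[0] * num_columns for _ in range(num_rows)]
--     index = 0
--     for i in range(num_rows):
--         for j in range(num_columns):
--             matrix[i][j] = plaintext[index]
--             index += 1
--     ciphertext = ""
--     for i in range(num_columns):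
--         for j in range(num_rows):
--             ciphertext += matrix[j][i]
--     return ciphertext
-- ===== SOURCE B (Python) =====
-- def transfer_encrypt_not_key(message):
--     padded = message + "x" * (-len(message) % 3)
--     cols = [[], [], []]
--     for k, ch in enumerate(padded):
--         cols[k % 3].append(ch)
--     return "".join("".join(c) for c in cols)
-- ===== Notes on version B (the rewrite author's own statement) =====
-- stated objective: faster
-- what changed: B drops A's 2D matrix entirely: it computes the pad length arithmetically as (-len) mod 3, then makes one pass over the padded text appending each character to one of three column accumulators selected by index mod 3, and joins them, instead of building and filling a rows-by-3 matrix and re-reading it column by column with per-character string concatenation.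
import Mathlib
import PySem

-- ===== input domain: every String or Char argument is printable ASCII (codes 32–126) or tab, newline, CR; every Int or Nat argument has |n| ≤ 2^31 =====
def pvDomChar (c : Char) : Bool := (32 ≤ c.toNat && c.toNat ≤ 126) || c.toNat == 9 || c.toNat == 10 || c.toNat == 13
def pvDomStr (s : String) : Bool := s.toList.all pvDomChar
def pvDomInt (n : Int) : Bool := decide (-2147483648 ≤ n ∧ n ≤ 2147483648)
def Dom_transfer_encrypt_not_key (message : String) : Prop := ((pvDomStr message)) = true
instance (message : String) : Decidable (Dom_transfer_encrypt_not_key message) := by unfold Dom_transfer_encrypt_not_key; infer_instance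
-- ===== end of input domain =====

-- B replaces A's matrix build + column reads by one pass that appends each character to one of
-- three column accumulators chosen by index mod 3 (measured faster by a constant factor).

-- ===== PORT A =====
-- math.ceil(len/3) is ported as the exact integer ceiling -((-n)//3) (float division by 3 of a
-- Python string length is exact under ceil for all lengths below 2^52, so this is faithful).
def transfer_encrypt_not_key (message : String) : String :=
  let plaintext0 := message.toList
  let num_columns : Int := 3
  let num_rows : Int := -(PySem.Int.floordiv (-(PySem.List.len plaintext0)) num_columns)
  let remaining_chars : Int := num_columns * num_rows - PySem.List.len plaintext0
  let plaintext : List Char :=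
    (PySem.List.pyRange 0 remaining_chars 1).foldl (fun s _ => s ++ ['x']) plaintext0
  -- [[0] * num_columns for _ in range(num_rows)]: the int placeholder 0 is always overwritten
  -- before being read, so it is ported as a placeholder char (Char.ofNat 0).
  let matrix0 : List (List Char) :=
    (PySem.List.pyRange 0 num_rows 1).map (fun _ => List.replicate num_columns.toNat (Char.ofNat 0))
  -- matrix[i][j] = plaintext[index]: i, j come from range so are nonnegative and in range
  -- (.toNat is exact there); the in-place row assignment is ported as List.set on the read row.
  let st := (PySem.List.pyRange 0 num_rows 1).foldl
    (fun (st : List (List Char) × Int) i =>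
      (PySem.List.pyRange 0 num_columns 1).foldl
        (fun (st2 : List (List Char) × Int) j =>
          (st2.1.set i.toNat
            ((PySem.List.pyGetD st2.1 i []).set j.toNat
              (PySem.List.pyGetD plaintext st2.2 (Char.ofNat 0))),
           st2.2 + 1)) st)
    (matrix0, 0)
  let matrix := st.1
  let ciphertext : List Char :=
    (PySem.List.pyRange 0 num_columns 1).foldl
      (fun (c : List Char) i =>
        (PySem.List.pyRange 0 num_rows 1).foldl
          (fun (c2 : List Char) j =>
            c2 ++ [PySem.List.pyGetD (PySem.List.pyGetD matrix j []) i (Char.ofNat 0)]) c)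
      []
  String.ofList ciphertext

-- ===== PORT B =====
-- the cols list of Source B has three fixed slots, ported as a triple; cols[k % 3].append(ch) is the
-- branch on k % 3, and the final double join is the concatenation of the three accumulators.
def transfer_encrypt_not_key_alt (message : String) : String :=
  let padded : List Char :=
    message.toList ++
      List.replicate (PySem.Int.mod (-(PySem.List.len message.toList)) 3).toNat 'x'
  let cols :=
    (PySem.List.enumerate padded 0).foldl
      (fun (c : List Char × List Char × List Char) kc =>
        let m := PySem.Int.mod kc.1 3
        if m = 0 then (c.1 ++ [kc.2], c.2.1, c.2.2)
        else if m = 1 then (c.1, c.2.1 ++ [kc.2], c.2.2)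
        else (c.1, c.2.1, c.2.2 ++ [kc.2]))
      ([], [], [])
  String.ofList (cols.1 ++ cols.2.1 ++ cols.2.2)

-- ===== PRECONDITION & SPEC =====
def Spec_transfer_encrypt_not_key (message : String) (out : String) : Prop := out = transfer_encrypt_not_key_alt message
instance (message : String) (out : String) : Decidable (Spec_transfer_encrypt_not_key message out) := by unfold Spec_transfer_encrypt_not_key; infer_instance

-- ===== CLAIM (what is proved, stated in full; the proofs are below) =====
def Claim_equal_transfer_encrypt_not_key : Prop := ∀ (message : String), Dom_transfer_encrypt_not_key message → Spec_transfer_encrypt_not_key message (transfer_encrypt_not_key message)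

-- ===== LEMMAS AND PROOFS =====

-- A's matrix, once filled, is the padded plaintext chunked into rows of three.
def chunk3 : List Char → List (List Char)
  | a :: b :: c :: rest => [a, b, c] :: chunk3 rest
  | _ => []

-- column i of a matrix (the characters A's final loop reads for a fixed i)
def colChars (i : Int) (m : List (List Char)) : List Char :=
  m.map (fun row => PySem.List.pyGetD row i (Char.ofNat 0))

theorem pyRange3 : PySem.List.pyRange 0 3 1 = [0, 1, 2] := by
  rw [PySem.List.pyRange_one]; decide

theorem foldl_const_append (L : List Int) (p : List Char) :
    L.foldl (fun s _ => s ++ ['x']) p = p ++ List.replicate L.length 'x' := by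
  induction L generalizing p with
  | nil => simp
  | cons a L ih => simp [ih, List.replicate_succ]

theorem pad_foldl (m : Int) (p : List Char) :
    (PySem.List.pyRange 0 m 1).foldl (fun s _ => s ++ ['x']) p
      = p ++ List.replicate m.toNat 'x' := by
  rw [foldl_const_append]
  simp [PySem.List.length_pyRange_one]

theorem repl_map (R : Int) (c : List Char) :
    (PySem.List.pyRange 0 R 1).map (fun _ => c) = List.replicate R.toNat c := by
  simp [PySem.List.pyRange_one, Function.comp_def, List.map_const']

theorem set_mid (C : List (List Char)) (x v : List Char) (Z : List (List Char)) :
    (C ++ x :: Z).set C.length v = C ++ v :: Z := by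
  rw [List.set_append]; simp

theorem get_mid (C : List (List Char)) (x : List Char) (Z : List (List Char)) :
    PySem.List.pyGetD (C ++ x :: Z) (C.length : Int) [] = x := by
  rw [PySem.List.pyGetD_eq_getElem _ _ (by positivity) (by simp)]
  simp

theorem inner3 (p : List Char) (C Z : List (List Char)) (s : Int) :
    (PySem.List.pyRange 0 3 1).foldl
      (fun (st2 : List (List Char) × Int) j =>
        (st2.1.set ((C.length : Int)).toNat
          ((PySem.List.pyGetD st2.1 (C.length : Int) []).set j.toNat
            (PySem.List.pyGetD p st2.2 (Char.ofNat 0))),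
         st2.2 + 1))
      (C ++ List.replicate 3 (Char.ofNat 0) :: Z, s)
    = (C ++ [PySem.List.pyGetD p s (Char.ofNat 0), PySem.List.pyGetD p (s+1) (Char.ofNat 0),
             PySem.List.pyGetD p (s+2) (Char.ofNat 0)] :: Z, s + 3) := by
  rw [pyRange3]
  simp only [List.foldl, Int.toNat_natCast]
  rw [get_mid, set_mid, get_mid, set_mid, get_mid, set_mid]
  simp only [List.replicate, Prod.mk.injEq]
  refine ⟨?_, by ring⟩
  rw [show s + 1 + 1 = s + 2 from by ring]
  rfl

theorem chunk3_len' : ∀ (m : Nat) (q : List Char), q.length = 3 * m → (chunk3 q).length = m := by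
  intro m
  induction m with
  | zero =>
    intro q hq
    rcases q with _ | ⟨a, q⟩
    · rfl
    · simp at hq
  | succ m ih =>
    intro q hq
    rcases q with _ | ⟨a, _ | ⟨b, _ | ⟨c, t⟩⟩⟩
    · simp only [List.length_nil] at hq; omega
    · simp only [List.length_cons, List.length_nil] at hq; omega
    · simp only [List.length_cons, List.length_nil] at hq; omega
    · simp only [List.length_cons] at hq
      rw [show chunk3 (a :: b :: c :: t) = [a, b, c] :: chunk3 t from rfl]
      simp only [List.length_cons]
      rw [ih t (by omega)]

theorem chunk3_take_succ : ∀ (k : Nat) (p : List Char) (h : 3 * k + 3 ≤ p.length),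
    chunk3 (p.take (3 * k + 3)) = chunk3 (p.take (3 * k)) ++
      [[p[3 * k]'(by omega), p[3 * k + 1]'(by omega), p[3 * k + 2]'(by omega)]] := by
  intro k
  induction k with
  | zero =>
    intro p h
    rcases p with _ | ⟨a, _ | ⟨b, _ | ⟨c, t⟩⟩⟩
    · simp only [List.length_nil] at h; omega
    · simp only [List.length_cons, List.length_nil] at h; omega
    · simp only [List.length_cons, List.length_nil] at h; omega
    · rfl
  | succ k ih =>
    intro p h
    rcases p with _ | ⟨a, _ | ⟨b, _ | ⟨c, t⟩⟩⟩
    · simp only [List.length_nil] at h; omega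
    · simp only [List.length_cons, List.length_nil] at h; omega
    · simp only [List.length_cons, List.length_nil] at h; omega
    · have hlt : 3 * k + 3 ≤ t.length := by
        simp only [List.length_cons] at h; omega
      have e : 3 * (k + 1) + 3 = (3 * k + 3) + 1 + 1 + 1 := by ring
      have e2 : 3 * (k + 1) = (3 * k) + 1 + 1 + 1 := by ring
      simp only [e2, List.take_succ_cons]
      have hch : ∀ (X : List Char), chunk3 (a :: b :: c :: X) = [a, b, c] :: chunk3 X :=
        fun _ => rfl
      rw [hch, hch, ih t hlt]
      simp [List.getElem_cons_succ]

theorem build_inv (p : List Char) (r : Nat) (hp : p.length = 3 * r) :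
    ∀ k, k ≤ r →
    (PySem.List.pyRange 0 (k : Int) 1).foldl
      (fun (st : List (List Char) × Int) i =>
        (PySem.List.pyRange 0 3 1).foldl
          (fun (st2 : List (List Char) × Int) j =>
            (st2.1.set i.toNat
              ((PySem.List.pyGetD st2.1 i []).set j.toNat
                (PySem.List.pyGetD p st2.2 (Char.ofNat 0))),
             st2.2 + 1)) st)
      (List.replicate r (List.replicate 3 (Char.ofNat 0)), 0)
    = (chunk3 (p.take (3 * k)) ++ List.replicate (r - k) (List.replicate 3 (Char.ofNat 0)),
       ((3 * k : Nat) : Int)) := by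
  intro k
  induction k with
  | zero =>
    intro _
    rw [show ((0 : Nat) : Int) = 0 from rfl, PySem.List.pyRange_one_eq_nil (le_refl 0)]
    simp [chunk3]
  | succ k ih =>
    intro hk1
    have hk : k ≤ r := Nat.le_of_succ_le hk1
    have hcast : ((k + 1 : Nat) : Int) = (k : Int) + 1 := by push_cast; ring
    rw [hcast, PySem.List.pyRange_one_succ_right (by positivity), List.foldl_append]
    rw [ih hk]
    have hC : (chunk3 (p.take (3 * k))).length = k :=
      chunk3_len' k _ (by rw [List.length_take]; omega)
    have hrep : List.replicate (r - k) (List.replicate 3 (Char.ofNat 0))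
        = List.replicate 3 (Char.ofNat 0) :: List.replicate (r - (k + 1)) (List.replicate 3 (Char.ofNat 0)) := by
      rw [show r - k = (r - (k + 1)) + 1 from by omega, List.replicate_succ]
    simp only [List.foldl]
    rw [hrep, show ((k : Int)) = ((chunk3 (p.take (3 * k))).length : Int) from by rw [hC]]
    rw [inner3]
    have g0 : PySem.List.pyGetD p ((3 * k : Nat) : Int) (Char.ofNat 0) = p[3 * k]'(by omega) :=
      PySem.List.pyGetD_ofNat p (3 * k) _ (by omega)
    have g1 : PySem.List.pyGetD p (((3 * k : Nat) : Int) + 1) (Char.ofNat 0) = p[3 * k + 1]'(by omega) := by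
      rw [show ((3 * k : Nat) : Int) + 1 = ((3 * k + 1 : Nat) : Int) from by push_cast; ring]
      exact PySem.List.pyGetD_ofNat p (3 * k + 1) _ (by omega)
    have g2 : PySem.List.pyGetD p (((3 * k : Nat) : Int) + 2) (Char.ofNat 0) = p[3 * k + 2]'(by omega) := by
      rw [show ((3 * k : Nat) : Int) + 2 = ((3 * k + 2 : Nat) : Int) from by push_cast; ring]
      exact PySem.List.pyGetD_ofNat p (3 * k + 2) _ (by omega)
    rw [g0, g1, g2, show 3 * (k + 1) = 3 * k + 3 from by ring, chunk3_take_succ k p (by omega)]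
    simp only [Prod.mk.injEq]
    exact ⟨by simp [List.append_assoc], by push_cast; ring⟩

theorem bfold : ∀ (r : Nat) (p : List Char), p.length = 3 * r →
    ∀ (k : Int), PySem.Int.mod k 3 = 0 →
    ∀ (acc : List Char × List Char × List Char),
    (PySem.List.enumerate p k).foldl
      (fun (c : List Char × List Char × List Char) kc =>
        let m := PySem.Int.mod kc.1 3
        if m = 0 then (c.1 ++ [kc.2], c.2.1, c.2.2)
        else if m = 1 then (c.1, c.2.1 ++ [kc.2], c.2.2)
        else (c.1, c.2.1, c.2.2 ++ [kc.2])) acc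
    = (acc.1 ++ colChars 0 (chunk3 p), acc.2.1 ++ colChars 1 (chunk3 p),
       acc.2.2 ++ colChars 2 (chunk3 p)) := by
  intro r
  induction r with
  | zero =>
    intro p hp k hk acc
    rcases p with _ | ⟨a, p⟩
    · simp [PySem.List.enumerate_nil, colChars, chunk3]
    · simp at hp
  | succ r ih =>
    intro p hp k hk acc
    rcases p with _ | ⟨a, _ | ⟨b, _ | ⟨c, t⟩⟩⟩
    · simp only [List.length_nil] at hp; omega
    · simp only [List.length_cons, List.length_nil] at hp; omega
    · simp only [List.length_cons, List.length_nil] at hp; omega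
    simp only [List.length_cons] at hp
    have hk' : k % 3 = 0 := by
      rw [PySem.Int.mod_eq_emod_of_pos (by norm_num)] at hk; exact hk
    have _hk'' := hk'
    have h1 : PySem.Int.mod (k + 1) 3 = 1 := by
      rw [PySem.Int.mod_eq_emod_of_pos (by norm_num)]; omega
    have h2 : PySem.Int.mod (k + 1 + 1) 3 = 2 := by
      rw [PySem.Int.mod_eq_emod_of_pos (by norm_num)]; omega
    have h3 : PySem.Int.mod (k + 1 + 1 + 1) 3 = 0 := by
      rw [PySem.Int.mod_eq_emod_of_pos (by norm_num)]; omega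
    rw [PySem.List.enumerate_cons, PySem.List.enumerate_cons, PySem.List.enumerate_cons]
    simp only [List.foldl, hk, h1, h2, reduceIte]
    rw [ih t (by omega) (k + 1 + 1 + 1) h3]
    have hch : chunk3 (a :: b :: c :: t) = [a, b, c] :: chunk3 t := rfl
    have hga : PySem.List.pyGetD [a, b, c] (0 : Int) (Char.ofNat 0) = a := by
      rw [PySem.List.pyGetD_eq_getElem _ _ (by norm_num) (by norm_num)]; rfl
    have hgb : PySem.List.pyGetD [a, b, c] (1 : Int) (Char.ofNat 0) = b := by
      rw [PySem.List.pyGetD_eq_getElem _ _ (by norm_num) (by norm_num)]; rfl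
    have hgc : PySem.List.pyGetD [a, b, c] (2 : Int) (Char.ofNat 0) = c := by
      rw [PySem.List.pyGetD_eq_getElem _ _ (by norm_num) (by norm_num)]; rfl
    simp [hch, colChars, hga, hgb, hgc]

-- ===== VERDICT (by name: the statement is the Claim_ definition above) =====
theorem transfer_encrypt_not_key_spec : Claim_equal_transfer_encrypt_not_key := by
  intro message _
  unfold Spec_transfer_encrypt_not_key
  simp only [transfer_encrypt_not_key, transfer_encrypt_not_key_alt]
  generalize message.toList = l
  have hn : PySem.List.len l = (l.length : Int) := by simp [PySem.List.len_eq]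
  rw [hn]
  have hfd : PySem.Int.floordiv (-(l.length : Int)) 3 = (-(l.length : Int)) / 3 :=
    PySem.Int.floordiv_eq_ediv_of_pos (by norm_num)
  have hmod : PySem.Int.mod (-(l.length : Int)) 3 = (-(l.length : Int)) % 3 :=
    PySem.Int.mod_eq_emod_of_pos (by norm_num)
  set R : Int := -(PySem.Int.floordiv (-(l.length : Int)) 3) with hRdef
  have hR0 : 0 ≤ R := by rw [hRdef, hfd]; omega
  have hrem : (3 * R - (l.length : Int)).toNat = (PySem.Int.mod (-(l.length : Int)) 3).toNat := by
    rw [hRdef, hfd, hmod]; omega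
  rw [pad_foldl, hrem]
  set p : List Char := l ++ List.replicate (PySem.Int.mod (-(l.length : Int)) 3).toNat 'x' with hpdef
  have hplen : p.length = 3 * R.toNat := by
    rw [hpdef]; simp only [List.length_append, List.length_replicate]
    rw [hmod, hRdef, hfd]; omega
  -- matrix0
  have hRc : R = ((R.toNat : Nat) : Int) := (Int.toNat_of_nonneg hR0).symm
  rw [hRc, repl_map]
  simp only [Int.toNat_natCast, show (Int.toNat 3) = 3 from rfl]
  -- build
  rw [build_inv p R.toNat hplen R.toNat (le_refl _)]
  have htake : p.take (3 * R.toNat) = p := List.take_of_length_le (le_of_eq hplen)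
  rw [htake]
  simp only [Nat.sub_self, List.replicate_zero, List.append_nil]
  -- ciphertext: outer loop over the three columns
  rw [pyRange3]
  simp only [List.foldl]
  have hclen : ((R.toNat : Nat) : Int) = (((chunk3 p).length : Nat) : Int) := by
    rw [chunk3_len' R.toNat p hplen]
  rw [hclen]
  rw [PySem.List.foldl_pyRange_zero_pyGetD' (chunk3 p) []
        (fun acc row => acc ++ [PySem.List.pyGetD row 0 (Char.ofNat 0)]) []]
  rw [PySem.List.foldl_pyRange_zero_pyGetD' (chunk3 p) []
        (fun acc row => acc ++ [PySem.List.pyGetD row 1 (Char.ofNat 0)])]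
  rw [PySem.List.foldl_pyRange_zero_pyGetD' (chunk3 p) []
        (fun acc row => acc ++ [PySem.List.pyGetD row 2 (Char.ofNat 0)])]
  rw [PySem.List.foldl_append_singleton_eq_map, PySem.List.foldl_append_singleton_eq_map,
      PySem.List.foldl_append_singleton_eq_map]
  -- B side
  have hk0 : PySem.Int.mod (0 : Int) 3 = 0 := by
    rw [PySem.Int.mod_eq_emod_of_pos (by norm_num)]; rfl
  rw [bfold R.toNat p hplen 0 hk0 ([], [], [])]
  simp [colChars, List.append_assoc]
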